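-- pv_equiv track=rewrite | github.com/ankit-0044/Python | Python/Question Solve/SuperLcm.py | SuperLCM
-- ===== SOURCE A (Python) =====
-- def SuperLCM(n):
--     ans = 0
--     # LCM Code
--     for j in range(1,n+1):
--         lar = max(j,n)
--         small = min(j,n)
--         i = lar
--         while(1):
--             if(i%small == 0):
--                 break
--             i += lar
--         # multiply LCM and power
--         ans += i * pow(j,n-j)
--     return ans
-- ===== SOURCE B (Python) =====
-- def SuperLCM(n):
--     ans = 0
--     for j in range(1, n + 1):
--         # Euclidean gcd instead of A's multiple-striding search for the LCM
--         a, b = j, n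
--         while b:
--             a, b = b, a % b
--         ans += (j * n // a) * pow(j, n - j)
--     return ans
-- ===== Notes on version B (the rewrite author's own statement) =====
-- stated objective: alternative
-- what changed: The inner LCM computation scans multiples of max(j,n) in A; B instead runs a Euclidean-gcd remainder loop and divides j*n by the gcd.
import Mathlib
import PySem

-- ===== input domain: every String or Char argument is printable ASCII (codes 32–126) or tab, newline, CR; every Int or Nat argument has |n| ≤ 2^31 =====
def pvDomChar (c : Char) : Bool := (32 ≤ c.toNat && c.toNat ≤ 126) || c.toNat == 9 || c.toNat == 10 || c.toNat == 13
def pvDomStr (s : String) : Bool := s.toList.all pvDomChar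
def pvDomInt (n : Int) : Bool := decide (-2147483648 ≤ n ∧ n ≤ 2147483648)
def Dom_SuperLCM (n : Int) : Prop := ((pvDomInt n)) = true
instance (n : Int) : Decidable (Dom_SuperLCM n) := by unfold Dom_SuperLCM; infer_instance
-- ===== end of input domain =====

-- B computes each LCM with a Euclidean-gcd remainder loop instead of A's scan over multiples; alternative algorithm, same results.


-- ===== PORT A =====
-- A's inner 'while(1): if i % small == 0: break; i += lar' loop; fuel only makes it
-- total (small.natAbs steps always suffice to reach a multiple of small).
def SuperLCM_while (lar small : Int) : Nat → Int → Int
  | 0, i => i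
  | f + 1, i => if PySem.Int.mod i small = 0 then i else SuperLCM_while lar small f (i + lar)

def SuperLCM (n : Int) : Int :=
  (PySem.List.pyRange 1 (n + 1) 1).foldl
    (fun ans j =>
      let lar := max j n
      let small := min j n
      let i := SuperLCM_while lar small small.natAbs lar
      ans + i * j ^ (n - j).toNat)
    0

-- ===== PORT B =====
-- B's 'while b: a, b = b, a % b' loop; fuel only makes it total (|b| strictly decreases).
def SuperLCM_gcd : Nat → Int → Int → Int
  | 0, a, _ => a
  | f + 1, a, b => if b = 0 then a else SuperLCM_gcd f b (PySem.Int.mod a b)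

def SuperLCM_alt (n : Int) : Int :=
  (PySem.List.pyRange 1 (n + 1) 1).foldl
    (fun ans j =>
      ans + PySem.Int.floordiv (j * n) (SuperLCM_gcd (n.natAbs + 1) j n) * j ^ (n - j).toNat)
    0

-- ===== PRECONDITION & SPEC =====
def Spec_SuperLCM (n : Int) (out : Int) : Prop := out = SuperLCM_alt n
instance (n : Int) (out : Int) : Decidable (Spec_SuperLCM n out) := by unfold Spec_SuperLCM; infer_instance

-- ===== CLAIM (what is proved, stated in full; the proofs are below) =====
def Claim_equal_SuperLCM : Prop := ∀ (n : Int), Dom_SuperLCM n → Spec_SuperLCM n (SuperLCM n)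

-- ===== LEMMAS AND PROOFS =====

-- B's Euclid loop computes the gcd (nonnegative arguments, enough fuel).
theorem SuperLCM_gcd_eq (k : Nat) : ∀ (f : Nat) (a b : Int), 0 ≤ a → 0 ≤ b →
    b.toNat ≤ k → b.toNat < f → SuperLCM_gcd f a b = (Int.gcd a b : Int) := by
  induction k with
  | zero =>
    intro f a b ha hb hk hf
    have hb0 : b = 0 := by omega
    subst hb0
    match f, hf with
    | f + 1, _ =>
      simp [SuperLCM_gcd, Int.natAbs_of_nonneg ha]
  | succ k ih =>
    intro f a b ha hb hk hf
    match f, hf with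
    | f + 1, _ =>
      by_cases hb0 : b = 0
      · subst hb0
        simp [SuperLCM_gcd, Int.natAbs_of_nonneg ha]
      · have hbpos : 0 < b := lt_of_le_of_ne hb (Ne.symm hb0)
        have hmod : PySem.Int.mod a b = a % b := PySem.Int.mod_eq_emod_of_pos hbpos
        have hmn : 0 ≤ a % b := Int.emod_nonneg a hb0
        have hml : a % b < b := Int.emod_lt_of_pos a hbpos
        have hrec := ih f b (a % b) hb hmn (by omega) (by omega)
        simp only [SuperLCM_gcd, hb0, if_false, hmod, hrec]
        congr 1
        obtain ⟨A, rfl⟩ := Int.eq_ofNat_of_zero_le ha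
        obtain ⟨B, rfl⟩ := Int.eq_ofNat_of_zero_le hb
        have : ((A : Int)) % (B : Int) = ((A % B : Nat) : Int) := by push_cast; rfl
        rw [this]
        simp only [Int.gcd_def, Int.natAbs_natCast]
        rw [Nat.gcd_comm B (A % B), ← Nat.gcd_rec B A, Nat.gcd_comm B A]

-- A's multiple-striding inner loop: starting from a positive multiple i of n with
-- i ≤ lcm and enough fuel to reach lcm, it stops exactly at lcm j n.
theorem SuperLCM_while_eq (j n : Int) (_hj : 0 < j) (hn : 0 < n) :
    ∀ (f : Nat) (i : Int), n ∣ i → 0 < i → i ≤ (Int.lcm j n : Int) →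
    (Int.lcm j n : Int) ≤ i + (f : Int) * n →
    SuperLCM_while n j f i = (Int.lcm j n : Int) := by
  have hjd : j ∣ (Int.lcm j n : Int) := Int.dvd_lcm_left j n
  have hnd : n ∣ (Int.lcm j n : Int) := Int.dvd_lcm_right j n
  intro f
  induction f with
  | zero =>
    intro i _ _ hle hge
    simp only [Nat.cast_zero, zero_mul, add_zero] at hge
    have : i = (Int.lcm j n : Int) := le_antisymm hle hge
    simpa [SuperLCM_while] using this
  | succ f ih =>
    intro i hni hipos hle hge
    by_cases hdvd : PySem.Int.mod i j = 0
    · -- j ∣ i, so i is a common multiple: lcm ≤ i, hence i = lcm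
      have hjdi : j ∣ i := (PySem.Int.mod_eq_zero_iff_dvd i j).mp hdvd
      have hlcm_dvd : (Int.lcm j n : Int) ∣ i := Int.coe_lcm j n ▸ lcm_dvd hjdi hni
      have : (Int.lcm j n : Int) ≤ i := Int.le_of_dvd hipos hlcm_dvd
      have hie : i = (Int.lcm j n : Int) := le_antisymm hle this
      simp only [SuperLCM_while, if_pos hdvd]
      exact hie
    · -- j ∤ i, so i ≠ lcm, i < lcm, and i + n ≤ lcm (both multiples of n)
      have hne : i ≠ (Int.lcm j n : Int) := by
        intro h; exact hdvd ((PySem.Int.mod_eq_zero_iff_dvd i j).mpr (h ▸ hjd))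
      have hlt : i < (Int.lcm j n : Int) := lt_of_le_of_ne hle hne
      have hdiff : n ∣ ((Int.lcm j n : Int) - i) := dvd_sub hnd hni
      have hstep : i + n ≤ (Int.lcm j n : Int) := by
        have := Int.le_of_dvd (by omega) hdiff
        omega
      simp only [SuperLCM_while, hdvd, if_false]
      exact ih (i + n) (by exact dvd_add hni dvd_rfl) (by omega) hstep
        (by push_cast at hge ⊢; linarith)

-- the per-element values agree for 1 ≤ j ≤ n
theorem SuperLCM_inner_eq (n j : Int) (h1 : 1 ≤ j) (h2 : j ≤ n) :
    SuperLCM_while (max j n) (min j n) (min j n).natAbs (max j n)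
      = PySem.Int.floordiv (j * n) (SuperLCM_gcd (n.natAbs + 1) j n) := by
  have hj : 0 < j := h1
  have hn : 0 < n := lt_of_lt_of_le hj h2
  have hmax : max j n = n := max_eq_right h2
  have hmin : min j n = j := min_eq_left h2
  have hgcd : SuperLCM_gcd (n.natAbs + 1) j n = (Int.gcd j n : Int) :=
    SuperLCM_gcd_eq n.toNat (n.natAbs + 1) j n (by omega) (by omega) (le_refl _) (by omega)
  have hmul : ((Int.gcd j n : Int)) * (Int.lcm j n : Int) = j * n := by
    have h : ((Int.gcd j n : Int)) * (Int.lcm j n : Int) = (j.natAbs : Int) * (n.natAbs : Int) := by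
      exact_mod_cast congrArg (Nat.cast : Nat → Int) (Int.gcd_mul_lcm j n)
    rwa [Int.natAbs_of_nonneg hj.le, Int.natAbs_of_nonneg hn.le] at h
  have hgpos : (0 : Int) < (Int.gcd j n : Int) := by
    have : Int.gcd j n ≠ 0 := by
      simp [Int.gcd_eq_zero_iff]
      omega
    exact_mod_cast Nat.pos_of_ne_zero this
  have hlcm_pos : (0 : Int) < (Int.lcm j n : Int) := by
    nlinarith [hmul, hgpos, mul_pos hj hn]
  have hrhs : PySem.Int.floordiv (j * n) ((Int.gcd j n : Int)) = (Int.lcm j n : Int) := by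
    rw [PySem.Int.floordiv_eq_ediv_of_pos hgpos, ← hmul,
      Int.mul_ediv_cancel_left _ (by omega)]
  -- LHS: the striding loop reaches lcm
  have hlhs : SuperLCM_while n j j.natAbs n = (Int.lcm j n : Int) := by
    apply SuperLCM_while_eq j n hj hn j.natAbs n dvd_rfl hn
    · exact Int.le_of_dvd hlcm_pos (Int.dvd_lcm_right j n)
    · -- lcm ≤ n + j*n  since lcm ∣ j*n and 0 < j*n
      have hdvd : (Int.lcm j n : Int) ∣ j * n := ⟨(Int.gcd j n : Int), by linarith [hmul]⟩
      have := Int.le_of_dvd (by positivity) hdvd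
      have hcast : ((j.natAbs : Int)) = j := Int.natAbs_of_nonneg (by omega)
      rw [hcast]
      linarith
  rw [hmax, hmin, hgcd, hrhs, hlhs]

-- ===== VERDICT (by name: the statement is the Claim_ definition above) =====
theorem SuperLCM_spec : Claim_equal_SuperLCM := by
  intro n _
  unfold Spec_SuperLCM SuperLCM SuperLCM_alt
  apply PySem.List.foldl_congr_mem
  intro acc j hj
  rw [PySem.List.mem_pyRange_one] at hj
  have := SuperLCM_inner_eq n j hj.1 (by omega)
  simp only [this]
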